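-- pv_equiv track=rewrite | github.com/jbayardo/chezmoi | exact_dot_dev/exact_python/text2phone.py | char_to_number
-- ===== SOURCE A (Python) =====
-- def char_to_number(input_string):
--     # Mapping of letters to numbers
--     mapping = {
--         "a": "2",
--         "b": "2",
--         "c": "2",
--         "d": "3",
--         "e": "3",
--         "f": "3",
--         "g": "4",
--         "h": "4",
--         "i": "4",
--         "j": "5",
--         "k": "5",
--         "l": "5",
--         "m": "6",
--         "n": "6",
--         "o": "6",
--         "p": "7",
--         "q": "7",
--         "r": "7",
--         "s": "7",
--         "t": "8",
--         "u": "8",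
--         "v": "8",
--         "w": "9",
--         "x": "9",
--         "y": "9",
--         "z": "9",
--         "0": "0",
--         "1": "1",
--         "2": "2",
--         "3": "3",
--         "4": "4",
--         "5": "5",
--         "6": "6",
--         "7": "7",
--         "8": "8",
--         "9": "9",
--     }
--
--     # Convert each character in the input string to the corresponding number
--     output_numbers = ""
--     for char in input_string.lower():
--         if char in mapping:
--             output_numbers += mapping[char]
--         else:
--             # Any character not defined in the mapping gets a '*'
--             output_numbers += "*"
--
--     return output_numbers
-- ===== SOURCE B (Python) =====
-- GROUPS = (("2", "abc"), ("3", "def"), ("4", "ghi"), ("5", "jkl"),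
--           ("6", "mno"), ("7", "pqrs"), ("8", "tuv"), ("9", "wxyz"))
--
-- def char_to_number(input_string):
--     # Staged whole-string rewriting: lower once, then 26 global replace
--     # passes turn every letter into its keypad digit, and a final mask
--     # pass turns every remaining non-digit character into '*'.
--     s = input_string.lower()
--     for digit, letters in GROUPS:
--         for ch in letters:
--             s = s.replace(ch, digit)
--     return ''.join(c if c in "0123456789" else '*' for c in s)
-- ===== Notes on version B (the rewrite author's own statement) =====
-- stated objective: alternative
-- what changed: Replaces A's single pass with a per-character dict lookup by staged whole-string rewriting: 26 global replace passes map each letter to its keypad digit, then one mask pass turns every remaining non-digit into '*'.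
import Mathlib
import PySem

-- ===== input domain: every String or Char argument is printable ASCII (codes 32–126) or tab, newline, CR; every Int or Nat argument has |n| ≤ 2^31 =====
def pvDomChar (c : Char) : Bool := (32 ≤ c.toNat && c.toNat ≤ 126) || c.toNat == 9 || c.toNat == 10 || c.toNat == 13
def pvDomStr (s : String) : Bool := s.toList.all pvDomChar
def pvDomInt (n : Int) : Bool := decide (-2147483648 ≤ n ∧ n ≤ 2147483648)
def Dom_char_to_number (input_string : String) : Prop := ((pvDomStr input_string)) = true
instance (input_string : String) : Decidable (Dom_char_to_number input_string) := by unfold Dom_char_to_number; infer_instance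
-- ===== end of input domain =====

-- B replaces A's single-pass per-character dict lookup by staged whole-string rewriting:
-- 26 global replace passes turn letters into keypad digits, then a mask pass turns
-- every remaining non-digit into '*' (alternative decomposition, same asymptotic cost).

-- ===== PORT A =====
def ctnMapping : PySem.Dict String String := PySem.Dict.ofList
  [("a","2"),("b","2"),("c","2"),("d","3"),("e","3"),("f","3"),
   ("g","4"),("h","4"),("i","4"),("j","5"),("k","5"),("l","5"),
   ("m","6"),("n","6"),("o","6"),("p","7"),("q","7"),("r","7"),("s","7"),
   ("t","8"),("u","8"),("v","8"),("w","9"),("x","9"),("y","9"),("z","9"),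
   ("0","0"),("1","1"),("2","2"),("3","3"),("4","4"),
   ("5","5"),("6","6"),("7","7"),("8","8"),("9","9")]

-- one loop step of A: append mapping[char] if present, else '*' (output kept as List Char)
def ctnStepA (acc : List Char) (c : Char) : List Char :=
  match ctnMapping.get? (String.ofList [c]) with
  | some v => acc ++ v.toList
  | none => acc ++ ['*']

def char_to_number (input_string : String) : String :=
  String.ofList (((PySem.Str.lower input_string).toList).foldl ctnStepA [])

-- ===== PORT B =====
def ctnGroups : List (String × String) :=
  [("2","abc"),("3","def"),("4","ghi"),("5","jkl"),
   ("6","mno"),("7","pqrs"),("8","tuv"),("9","wxyz")]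

def char_to_number_alt (input_string : String) : String :=
  String.ofList ((ctnGroups.foldl
      (fun s p => p.2.toList.foldl
        (fun s ch => PySem.Str.replace s (String.ofList [ch]) p.1) s)
      (PySem.Str.lower input_string)).toList.map
    (fun c => if PySem.Str.isIn (String.ofList [c]) "0123456789" then c else '*'))

-- ===== PRECONDITION & SPEC =====
def Spec_char_to_number (input_string : String) (out : String) : Prop := out = char_to_number_alt input_string
instance (input_string : String) (out : String) : Decidable (Spec_char_to_number input_string out) := by unfold Spec_char_to_number; infer_instance

-- ===== CLAIM =====
def Claim_equal_char_to_number : Prop := ∀ (input_string : String), Dom_char_to_number input_string → Spec_char_to_number input_string (char_to_number input_string)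

-- ===== LEMMAS AND PROOFS =====

-- single-character substitution, and B's mask pass, as plain char functions
def ctnSubst (a b c : Char) : Char := if c = a then b else c
def ctnMask (c : Char) : Char :=
  if PySem.Str.isIn (String.ofList [c]) "0123456789" then c else '*'

-- the digit of one group, and the charwise effect of B's staged rewriting
def ctnDigit (p : String × String) : Char := p.1.toList.headD '*'
def ctnApp (gs : List (String × String)) (c : Char) : Char :=
  gs.foldl (fun c p => p.2.toList.foldl (fun c ch => ctnSubst ch (ctnDigit p) c) c) c
def ctnB (c : Char) : Char := ctnMask (ctnApp ctnGroups c)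

-- replacing a single character by a single character is a character map
theorem ctn_go_single (a b : Char) : ∀ (l : List Char) (fuel : Nat) (acc : List Char),
    l.length ≤ fuel →
    PySem.Chars.replace.go [a] [b] fuel l acc = acc.reverse ++ l.map (ctnSubst a b) := by
  intro l
  induction l with
  | nil =>
    intro fuel acc _
    cases fuel <;> simp [PySem.Chars.replace.go]
  | cons c t ih =>
    intro fuel acc hlen
    cases fuel with
    | zero => simp at hlen
    | succ n =>
      simp only [PySem.Chars.replace.go]
      by_cases h : a = c
      · subst h
        rw [if_pos (by simp [List.isPrefixOf])]
        rw [show List.drop ([a].length) (a :: t) = t by simp]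
        rw [ih n ([b].reverse ++ acc) (by simp at hlen; omega)]
        simp [ctnSubst]
      · rw [if_neg (by simp [List.isPrefixOf, h])]
        rw [ih n (c :: acc) (by simp at hlen; omega)]
        have hs : ctnSubst a b c = c := by
          unfold ctnSubst; exact if_neg (fun hc => h hc.symm)
        simp [hs]

theorem ctn_replace_single (l : List Char) (a b : Char) :
    PySem.Chars.replace l [a] [b] = l.map (ctnSubst a b) := by
  unfold PySem.Chars.replace
  simp only [List.isEmpty_cons, if_false, Bool.false_eq_true]
  simpa using ctn_go_single a b l l.length [] (le_refl _)

theorem ctn_toList_rep (s : String) (a : Char) (nstr : String) (b : Char)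
    (hb : nstr.toList = [b]) :
    (PySem.Str.replace s (String.ofList [a]) nstr).toList
      = s.toList.map (ctnSubst a b) := by
  rw [PySem.Str.toList_replace, String.toList_ofList, hb]
  exact ctn_replace_single s.toList a b

-- one group pass of B (all letters of one group replaced by its digit) is a character map
theorem ctn_inner (letters : List Char) (nstr : String) (b : Char) (hb : nstr.toList = [b]) :
    ∀ s : String,
      (letters.foldl (fun s ch => PySem.Str.replace s (String.ofList [ch]) nstr) s).toList
        = s.toList.map (fun c => letters.foldl (fun c ch => ctnSubst ch b c) c) := by
  induction letters with
  | nil => intro s; simp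
  | cons ch t ih =>
    intro s
    simp only [List.foldl_cons]
    rw [ih, ctn_toList_rep s ch nstr b hb, List.map_map]
    rfl

-- the whole staged rewriting is a character map by ctnApp
theorem ctn_outer (gs : List (String × String)) (h : ∀ p ∈ gs, p.1.toList = [ctnDigit p]) :
    ∀ s : String,
      ((gs.foldl (fun s p => p.2.toList.foldl
          (fun s ch => PySem.Str.replace s (String.ofList [ch]) p.1) s) s).toList
        = s.toList.map (ctnApp gs)) := by
  induction gs with
  | nil =>
    intro s
    show s.toList = s.toList.map (fun c => c)
    simp
  | cons p t ih =>
    intro s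
    simp only [List.foldl_cons]
    have hb := h p (by simp)
    rw [ih (fun q hq => h q (List.mem_cons_of_mem _ hq)),
      ctn_inner p.2.toList p.1 (ctnDigit p) hb s, List.map_map]
    apply List.map_congr_left
    intro c _
    rfl

-- B computes, characterwise, ctnB on the lowered string
set_option maxRecDepth 8192 in
set_option maxHeartbeats 1000000 in
theorem ctn_alt_eq (s : String) :
    char_to_number_alt s = String.ofList (((PySem.Str.lower s).toList).map ctnB) := by
  unfold char_to_number_alt
  rw [ctn_outer ctnGroups ?_ (PySem.Str.lower s), List.map_map]
  · apply congrArg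
    apply List.map_congr_left
    intro c _
    simp only [ctnB, ctnMask, Function.comp_apply]
  · intro p hp
    simp only [ctnGroups, List.mem_cons, List.not_mem_nil, or_false] at hp
    rcases hp with h | h | h | h | h | h | h | h <;> subst h <;> decide

-- per-character agreement of A's loop step with B's staged rewriting, over the domain
set_option maxRecDepth 8192 in
theorem ctnStep_agree_fin : ∀ n : Fin 127,
    ctnStepA [] (PySem.Chars.lowerChar (Char.ofNat n)) = [ctnB (PySem.Chars.lowerChar (Char.ofNat n))] := by
  decide

theorem ctnStep_agree (c : Char) (h : pvDomChar c = true) :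
    ctnStepA [] (PySem.Chars.lowerChar c) = [ctnB (PySem.Chars.lowerChar c)] := by
  have hlt : c.toNat < 127 := by
    simp only [pvDomChar, Bool.or_eq_true, Bool.and_eq_true, decide_eq_true_eq,
      beq_iff_eq] at h
    rcases h with ((⟨h1, h2⟩ | h) | h) | h <;> omega
  have := ctnStep_agree_fin ⟨c.toNat, hlt⟩
  simpa [Char.ofNat_toNat] using this

theorem ctnStepA_append (acc : List Char) (c : Char) :
    ctnStepA acc c = acc ++ ctnStepA [] c := by
  unfold ctnStepA
  cases ctnMapping.get? (String.ofList [c]) <;> simp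

theorem ctn_foldl (l : List Char) (acc : List Char)
    (h : ∀ c ∈ l, ctnStepA [] c = [ctnB c]) :
    l.foldl ctnStepA acc = acc ++ l.map ctnB := by
  induction l generalizing acc with
  | nil => simp
  | cons c l ih =>
    simp only [List.foldl_cons, List.map_cons]
    rw [ctnStepA_append, h c (by simp)]
    rw [ih _ (fun x hx => h x (by simp [hx]))]
    simp

-- ===== VERDICT =====
theorem char_to_number_spec : Claim_equal_char_to_number := by
  intro s hdom
  unfold Spec_char_to_number char_to_number
  rw [ctn_alt_eq]
  congr 1
  rw [ctn_foldl _ []]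
  · simp
  · intro c hc
    rw [PySem.Str.toList_lower, PySem.Chars.lower] at hc
    rcases List.mem_map.mp hc with ⟨c0, hc0, rfl⟩
    exact ctnStep_agree c0 (List.all_eq_true.mp hdom c0 hc0)
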